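-- pv_equiv track=rewrite | github.com/haebo9/coding-test | 프로그래머스/2/132265. 롤케이크 자르기/롤케이크 자르기.py | solution
-- ===== SOURCE A (Python) =====
-- from collections import Counter
--
-- def solution(topping):
--     answer = 0
--     p1 = dict(Counter(topping))
--     p2 = set()
--
--     for t in topping:
--         p2.add(t)
--         if t in p1:
--             p1[t] -= 1
--
--             if p1[t] == 0:
--                 del p1[t]
--
--             if len(p1) == len(p2):
--                 answer +=1
--
--     return answer
-- ===== SOURCE B (Python) =====
-- def solution(topping):
--     n = len(topping)
--     right = [0] * n
--     seen = set()
--     for i in range(n - 1, -1, -1):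
--         right[i] = len(seen)      # distinct toppings in topping[i+1:]
--         seen.add(topping[i])
--     left = set()
--     answer = 0
--     for i, t in enumerate(topping):
--         left.add(t)
--         if len(left) == right[i]:
--             answer += 1
--     return answer
-- ===== Notes on version B (the rewrite author's own statement) =====
-- stated objective: alternative
-- what changed: A's single fused pass (a Counter shrinking while a set grows, comparing their sizes each step) is replaced by two separately-shaped passes: a right-to-left pass precomputing an array of suffix distinct counts, then a left-to-right prefix scan comparing the growing prefix set's size against that array.
import Mathlib
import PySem

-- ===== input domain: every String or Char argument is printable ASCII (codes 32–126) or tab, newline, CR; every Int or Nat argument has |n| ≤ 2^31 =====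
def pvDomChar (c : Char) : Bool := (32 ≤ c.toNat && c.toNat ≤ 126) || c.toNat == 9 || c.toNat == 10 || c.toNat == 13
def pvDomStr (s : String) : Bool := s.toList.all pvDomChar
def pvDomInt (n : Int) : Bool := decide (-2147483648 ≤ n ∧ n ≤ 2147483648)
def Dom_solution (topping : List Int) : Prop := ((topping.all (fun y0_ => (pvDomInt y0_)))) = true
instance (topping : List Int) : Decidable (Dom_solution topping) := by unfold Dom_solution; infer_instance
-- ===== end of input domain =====

-- B replaces A's single fused pass (a shrinking Counter and a growing set) by two passes:
-- a right-to-left pass precomputing suffix distinct counts, then a left-to-right prefix scan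
-- comparing against that array (objective: alternative decomposition, same O(n) cost).

-- ===== PORT A =====
-- one iteration of A's loop: p2.add(t); if t in p1: p1[t] -= 1; maybe del; compare sizes
def solStepA (st : Int × PySem.Dict Int Int × PySem.Set Int) (t : Int) :
    Int × PySem.Dict Int Int × PySem.Set Int :=
  let p2 := PySem.Set.add st.2.2 t
  if (st.2.1).contains t then
    let p1a := (st.2.1).modify t 0 (· - 1)
    let p1b := if p1a.getD t 0 = 0 then p1a.erase t else p1a
    if p1b.size = p2.length then (st.1 + 1, p1b, p2) else (st.1, p1b, p2)
  else (st.1, st.2.1, p2)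

def solution (topping : List Int) : Int :=
  (topping.foldl solStepA (0, PySem.Dict.counter topping, PySem.Set.empty)).1

-- ===== PORT B =====
-- B's first (right-to-left) pass: returns (seen set, right array) where
-- right[i] = number of distinct toppings strictly after index i
def solSuffix : List Int → PySem.Set Int × List Nat
  | [] => (PySem.Set.empty, [])
  | t :: rest =>
    let p := solSuffix rest
    (PySem.Set.add p.1 t, p.1.length :: p.2)

-- B's second pass: left.add(t); if len(left) == right[i]: answer += 1
def solStepB (st : PySem.Set Int × Int) (p : Int × Nat) : PySem.Set Int × Int :=
  let left := PySem.Set.add st.1 p.1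
  (left, if left.length = p.2 then st.2 + 1 else st.2)

def solution_alt (topping : List Int) : Int :=
  ((topping.zip (solSuffix topping).2).foldl solStepB (PySem.Set.empty, 0)).2

-- ===== PRECONDITION & SPEC =====
def Spec_solution (topping : List Int) (out : Int) : Prop := out = solution_alt topping
instance (topping : List Int) (out : Int) : Decidable (Spec_solution topping out) := by unfold Spec_solution; infer_instance

-- ===== CLAIM (what is proved, stated in full; the proofs are below) =====
def Claim_equal_solution : Prop := ∀ (topping : List Int), Dom_solution topping → Spec_solution topping (solution topping)

-- ===== LEMMAS AND PROOFS =====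

-- membership in the set built by B's right-to-left pass
theorem mem_solSuffix_fst (l : List Int) (k : Int) : k ∈ (solSuffix l).1 ↔ k ∈ l := by
  induction l with
  | nil => simp [solSuffix, PySem.Set.empty]
  | cons t rest ih =>
    simp [solSuffix, PySem.Set.mem_add, ih, List.mem_cons]
    tauto

theorem nodup_solSuffix_fst (l : List Int) : ((solSuffix l).1).Nodup := by
  induction l with
  | nil => simp [solSuffix, PySem.Set.empty]
  | cons t rest ih => exact PySem.Set.nodup_add _ _ ih

-- dict.erase lemmas (erase filters the item list)
theorem dict_get?_erase (d : PySem.Dict Int Int) (k k' : Int) :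
    (d.erase k).get? k' = if k' = k then none else d.get? k' := by
  rcases d with ⟨items⟩
  induction items with
  | nil => simp [PySem.Dict.erase, PySem.Dict.get?]
  | cons p rest ih =>
    simp only [PySem.Dict.erase, PySem.Dict.get?, List.filter_cons] at *
    by_cases hpk : p.1 = k
    · by_cases hk : k' = k
      · simp_all
      · have hpk' : ¬ p.1 = k' := by rw [hpk]; exact fun h => hk h.symm
        simp_all
    · by_cases hpk' : p.1 = k' <;> by_cases hk : k' = k <;> simp_all

theorem dict_getD_erase (d : PySem.Dict Int Int) (k k' : Int) :
    (d.erase k).getD k' 0 = if k' = k then 0 else d.getD k' 0 := by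
  simp [PySem.Dict.getD, dict_get?_erase]
  split_ifs <;> simp

theorem dict_contains_erase (d : PySem.Dict Int Int) (k k' : Int) :
    (d.erase k).contains k' = true → k' ≠ k ∧ d.contains k' = true := by
  simp only [PySem.Dict.contains_eq_isSome_get?, dict_get?_erase]
  split_ifs with h <;> simp [h]

theorem dict_nodup_keys_erase (d : PySem.Dict Int Int) (k : Int)
    (h : d.keys.Nodup) : (d.erase k).keys.Nodup := by
  apply List.Nodup.sublist _ h
  exact List.Sublist.map _ List.filter_sublist

-- the invariant A's dict satisfies before processing the remaining suffix `suf`: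
-- nodup keys, values are the multiplicities in `suf`, and no zero entries remain
def InvA (d : PySem.Dict Int Int) (suf : List Int) : Prop :=
  d.keys.Nodup ∧ (∀ k, d.getD k 0 = (suf.count k : Int)) ∧
    (∀ k, d.contains k = true → 0 < suf.count k)

theorem size_eq_of_invA (d : PySem.Dict Int Int) (l : List Int) (h : InvA d l) :
    d.size = ((solSuffix l).1).length := by
  obtain ⟨hn, hc, hp⟩ := h
  have hperm : d.keys.Perm (solSuffix l).1 := by
    rw [List.perm_ext_iff_of_nodup hn (nodup_solSuffix_fst l)]
    intro a
    rw [mem_solSuffix_fst]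
    constructor
    · intro ha
      have := hp a ((PySem.Dict.contains_iff_mem_keys d a).mpr ha)
      exact List.count_pos_iff.mp this
    · intro ha
      by_contra hmem
      have hnc : d.contains a = false := by
        cases hcc : d.contains a
        · rfl
        · exact absurd ((PySem.Dict.contains_iff_mem_keys d a).mp hcc) hmem
      have := hc a
      rw [PySem.Dict.getD_of_not_contains d 0 hnc] at this
      have : (l.count a : Int) > 0 := by exact_mod_cast List.count_pos_iff.mpr ha
      omega
  have : d.size = d.keys.length := by simp [PySem.Dict.size, PySem.Dict.keys]
  rw [this, hperm.length_eq]

-- the dict produced by one iteration of A's loop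
def solStepDict (d : PySem.Dict Int Int) (t : Int) : PySem.Dict Int Int :=
  if (d.modify t 0 (· - 1)).getD t 0 = 0 then (d.modify t 0 (· - 1)).erase t
  else d.modify t 0 (· - 1)

theorem invA_step (d : PySem.Dict Int Int) (t : Int) (rest : List Int)
    (h : InvA d (t :: rest)) : d.contains t = true ∧ InvA (solStepDict d t) rest := by
  obtain ⟨hn, hc, hp⟩ := h
  have hct : d.contains t = true := by
    cases hcc : d.contains t
    · exfalso
      have := hc t
      rw [PySem.Dict.getD_of_not_contains d 0 hcc] at this
      have : (0 : Int) = ((rest.count t) + 1 : Nat) := by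
        simpa [List.count_cons] using this
      omega
    · rfl
  refine ⟨hct, ?_, ?_, ?_⟩
  · -- nodup keys after the step
    have h1 : (d.modify t 0 (· - 1)).keys.Nodup := by
      rw [PySem.Dict.keys_modify]
      exact PySem.Dict.nodup_keys_insert d t _ hn
    unfold solStepDict
    split_ifs with h0
    · exact dict_nodup_keys_erase _ t h1
    · exact h1
  · -- values are the multiplicities in rest
    intro k
    have hmod : (d.modify t 0 (· - 1)).getD k 0 = (rest.count k : Int) := by
      rw [PySem.Dict.getD_modify]
      split_ifs with hk
      · subst hk
        rw [hc k]
        simp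
      · rw [hc k]
        have htk : ¬ t = k := fun h => hk h.symm
        simp [htk]
    unfold solStepDict
    split_ifs with h0
    · rw [dict_getD_erase]
      split_ifs with hk
      · subst hk
        rw [hmod] at h0
        omega
      · exact hmod
    · exact hmod
  · -- no zero entries remain
    intro k hk
    unfold solStepDict at hk
    have hmod : (d.modify t 0 (· - 1)).getD k 0 = (rest.count k : Int) := by
      rw [PySem.Dict.getD_modify]
      split_ifs with hkt
      · subst hkt
        rw [hc k]; simp
      · rw [hc k]
        have htk : ¬ t = k := fun h => hkt h.symm
        simp [htk]
    split_ifs at hk with h0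
    · -- erased branch: k survived the erase, so k ≠ t and k was in the modified dict
      obtain ⟨hkt, hkc⟩ := dict_contains_erase _ t k hk
      rw [PySem.Dict.contains_modify] at hkc
      have hkd : d.contains k = true := by
        rcases Bool.or_eq_true_iff.mp hkc with h' | h'
        · exact absurd (by exact_mod_cast eq_of_beq (by exact h')) hkt
        · exact h'
      have := hp k hkd
      have htk : ¬ t = k := fun h => hkt h.symm
      simp [htk] at this ⊢
      omega
    · -- no deletion: getD k ≠ 0 when k = t; otherwise contains carried over
      rw [PySem.Dict.contains_modify] at hk
      by_cases hkt : k = t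
      · subst hkt
        have h0' : (d.modify k 0 (· - 1)).getD k 0 ≠ 0 := h0
        rw [hmod] at h0'
        have : rest.count k ≠ 0 := by exact_mod_cast h0'
        omega
      · have hkd : d.contains k = true := by
          rcases Bool.or_eq_true_iff.mp hk with h' | h'
          · exact absurd (by exact_mod_cast eq_of_beq (by exact h')) hkt
          · exact h'
        have := hp k hkd
        have htk : ¬ t = k := fun h => hkt h.symm
        simp [htk] at this ⊢
        omega

theorem mainA (suf : List Int) :
    ∀ (d : PySem.Dict Int Int) (s : PySem.Set Int) (ans : Int), InvA d suf →
      (suf.foldl solStepA (ans, d, s)).1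
        = ((suf.zip (solSuffix suf).2).foldl solStepB (s, ans)).2 := by
  induction suf with
  | nil => intro d s ans _; simp [solSuffix]
  | cons t rest ih =>
    intro d s ans hinv
    obtain ⟨hct, hinv'⟩ := invA_step d t rest hinv
    have hsize : (solStepDict d t).size = ((solSuffix rest).1).length :=
      size_eq_of_invA _ _ hinv'
    have hA : solStepA (ans, d, s) t =
        (if (solStepDict d t).size = (PySem.Set.add s t).length then ans + 1 else ans,
          solStepDict d t, PySem.Set.add s t) := by
      simp only [solStepA, solStepDict, hct, if_true]
      split_ifs <;> rfl
    have hB : (solSuffix (t :: rest)).2 = ((solSuffix rest).1).length :: (solSuffix rest).2 := by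
      simp [solSuffix]
    rw [List.foldl_cons, hA, hB, List.zip_cons_cons, List.foldl_cons]
    have hstepB : solStepB (s, ans) (t, ((solSuffix rest).1).length) =
        (PySem.Set.add s t,
          if (PySem.Set.add s t).length = ((solSuffix rest).1).length then ans + 1 else ans) := rfl
    rw [hstepB]
    have hif : (if (solStepDict d t).size = (PySem.Set.add s t).length then ans + 1 else ans)
        = (if (PySem.Set.add s t).length = ((solSuffix rest).1).length then ans + 1 else ans) := by
      simp only [hsize]
      by_cases h : (PySem.Set.add s t).length = ((solSuffix rest).1).length
      · rw [if_pos h.symm, if_pos h]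
      · rw [if_neg (fun hh => h hh.symm), if_neg h]
    rw [hif]
    exact ih (solStepDict d t) (PySem.Set.add s t) _ hinv'

theorem invA_counter (topping : List Int) : InvA (PySem.Dict.counter topping) topping := by
  refine ⟨PySem.Dict.nodup_keys_counter topping, ?_, ?_⟩
  · intro k; exact PySem.Dict.getD_counter topping k
  · intro k hk
    rw [PySem.Dict.contains_counter] at hk
    exact List.count_pos_iff.mpr (by simpa using hk)

-- ===== VERDICT (by name: the statement is the Claim_ definition above) =====
theorem solution_spec : Claim_equal_solution := by
  intro topping _
  unfold Spec_solution solution solution_alt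
  exact mainA topping _ _ _ (invA_counter topping)
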